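-- pv_equiv track=rewrite | github.com/mckirk/adventofcode | lib/pos.py | line
-- ===== SOURCE A (Python) =====
-- def line(pos, dir, limits):
--     x, y = pos
--     xd, yd = dir
--     i = 1
--     while True:
--         x2 = x + xd * i
--         y2 = y + yd * i
--         if x2 < 0 or x2 > limits[0]:
--             break
--         if y2 < 0 or y2 > limits[1]:
--             break
--         yield (x2, y2)
--         i += 1
-- ===== SOURCE B (Python) =====
-- def line(pos, dir, limits):
--     x, y = pos
--     xd, yd = dir
--
--     def steps(c, d, lim):
--         # number of i >= 1 before the axis first leaves [0, lim]; None if it never does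
--         if d == 0:
--             return None if 0 <= c <= lim else 0
--         if c + d < 0 or c + d > lim:
--             return 0
--         return (lim - c) // d if d > 0 else c // (-d)
--
--     bounds = [s for s in (steps(x, xd, limits[0]), steps(y, yd, limits[1])) if s is not None]
--     n = min(bounds) if bounds else 0
--     for i in range(1, n + 1):
--         yield (x + xd * i, y + yd * i)
-- ===== Notes on version B (the rewrite author's own statement) =====
-- stated objective: alternative
-- what changed: Instead of stepping point by point and testing the grid bounds at each step, B solves the bound inequalities per axis in closed form to get the number of fitting steps and emits the points with one plain range loop; Pre_ excludes dir == (0, 0) with pos inside the limits, where A is an infinite generator and B naturally yields nothing.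
import Mathlib
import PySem

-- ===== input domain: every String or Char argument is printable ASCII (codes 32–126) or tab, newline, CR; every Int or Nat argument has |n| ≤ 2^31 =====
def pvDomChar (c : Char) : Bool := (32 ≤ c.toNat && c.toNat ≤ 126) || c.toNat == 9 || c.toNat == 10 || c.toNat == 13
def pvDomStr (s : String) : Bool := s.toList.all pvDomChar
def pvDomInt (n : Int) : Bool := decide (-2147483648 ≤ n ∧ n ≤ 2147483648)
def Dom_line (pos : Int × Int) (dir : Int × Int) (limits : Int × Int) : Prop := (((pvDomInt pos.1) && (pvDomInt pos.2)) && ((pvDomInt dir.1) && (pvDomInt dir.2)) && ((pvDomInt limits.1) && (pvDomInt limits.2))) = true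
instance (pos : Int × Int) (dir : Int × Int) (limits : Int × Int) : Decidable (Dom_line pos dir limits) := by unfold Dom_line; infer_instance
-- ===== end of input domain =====

-- B replaces A's step-by-step bound-testing loop by a closed-form per-axis step count
-- followed by a plain range loop (objective: alternative decomposition; producing the
-- k output points still costs O(k) either way).

-- ===== PORT A =====
-- A's 'while True' loop with the two break tests; the fuel only bounds the recursion and
-- is large enough that, on every input Pre_line admits, the loop breaks before it runs out.
def lineLoop (x y xd yd lx ly : Int) : Nat → Int → List (Int × Int)
  | 0, _ => []
  | fuel + 1, i =>
    let x2 := x + xd * i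
    let y2 := y + yd * i
    if x2 < 0 ∨ x2 > lx then []
    else if y2 < 0 ∨ y2 > ly then []
    else (x2, y2) :: lineLoop x y xd yd lx ly fuel (i + 1)

def line (pos : Int × Int) (dir : Int × Int) (limits : Int × Int) : List (Int × Int) :=
  lineLoop pos.1 pos.2 dir.1 dir.2 limits.1 limits.2
    (pos.1.natAbs + pos.2.natAbs + limits.1.natAbs + limits.2.natAbs + 2) 1

-- ===== PORT B =====
-- number of i >= 1 before the axis first leaves [0, lim]; none if it never does
def lineSteps (c d lim : Int) : Option Int :=
  if d = 0 then (if 0 ≤ c ∧ c ≤ lim then none else some 0)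
  else if c + d < 0 ∨ c + d > lim then some 0
  else if d > 0 then some (PySem.Int.floordiv (lim - c) d)
  else some (PySem.Int.floordiv c (-d))

def line_alt (pos : Int × Int) (dir : Int × Int) (limits : Int × Int) : List (Int × Int) :=
  let bounds := [lineSteps pos.1 dir.1 limits.1, lineSteps pos.2 dir.2 limits.2].filterMap id
  let n := match PySem.List.min? bounds (fun v => v) with
    | some m => m
    | none => 0
  (PySem.List.pyRange 1 (n + 1) 1).map (fun i => (pos.1 + dir.1 * i, pos.2 + dir.2 * i))

-- ===== PRECONDITION & SPEC =====
-- Pre_ excludes exactly the inputs where A is an infinite generator (never returns):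
-- dir = (0, 0) with pos inside the limits on both axes.
def Pre_line (pos : Int × Int) (dir : Int × Int) (limits : Int × Int) : Prop :=
  ¬ (dir.1 = 0 ∧ dir.2 = 0 ∧ 0 ≤ pos.1 ∧ pos.1 ≤ limits.1 ∧ 0 ≤ pos.2 ∧ pos.2 ≤ limits.2)
instance (pos : Int × Int) (dir : Int × Int) (limits : Int × Int) : Decidable (Pre_line pos dir limits) := by unfold Pre_line; infer_instance

def pvWitness_line : (Int × Int) × (Int × Int) × (Int × Int) := ((0, 0), (1, 1), (3, 5))

def Spec_line (pos : Int × Int) (dir : Int × Int) (limits : Int × Int) (out : List (Int × Int)) : Prop := out = line_alt pos dir limits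
instance (pos : Int × Int) (dir : Int × Int) (limits : Int × Int) (out : List (Int × Int)) : Decidable (Spec_line pos dir limits out) := by unfold Spec_line; infer_instance

-- ===== CLAIM (what is proved, stated in full; the proofs are below) =====
def Claim_equal_line : Prop := ∀ (pos : Int × Int) (dir : Int × Int) (limits : Int × Int), Dom_line pos dir limits → Pre_line pos dir limits → Spec_line pos dir limits (line pos dir limits)

-- ===== LEMMAS AND PROOFS =====

-- an axis is in bounds at step i
def axOk (c d lim i : Int) : Prop := 0 ≤ c + d * i ∧ c + d * i ≤ lim

lemma steps_none_spec (c d lim : Int) (h : lineSteps c d lim = none) :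
    d = 0 ∧ 0 ≤ c ∧ c ≤ lim := by
  unfold lineSteps at h
  split_ifs at h with h1 h2 <;> simp_all

lemma axOk_of_none (c d lim : Int) (h : lineSteps c d lim = none) (i : Int) :
    axOk c d lim i := by
  obtain ⟨hd, h0, h1⟩ := steps_none_spec c d lim h
  simp [axOk, hd, h0, h1]

lemma steps_some_spec (c d lim s : Int) (h : lineSteps c d lim = some s) :
    0 ≤ s ∧ (∀ i : Int, 1 ≤ i → i ≤ s → axOk c d lim i) ∧ ¬ axOk c d lim (s + 1) := by
  unfold lineSteps at h
  split_ifs at h with h1 h2 h3 h4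
  · obtain rfl : (0 : Int) = s := by simpa using h
    refine ⟨le_refl _, fun i hi1 hi2 => by omega, ?_⟩
    simp only [axOk, h1]
    omega
  · obtain rfl : (0 : Int) = s := by simpa using h
    refine ⟨le_refl _, fun i hi1 hi2 => by omega, ?_⟩
    simp only [axOk]
    intro hok
    omega
  · -- d > 0, s = (lim - c) // d
    have hs : s = PySem.Int.floordiv (lim - c) d := by simpa using h.symm
    push_neg at h3
    have hs1 : 1 ≤ s := by
      rw [hs, PySem.Int.le_floordiv_iff_mul_le h4]; omega
    have hub : s * d ≤ lim - c := by
      rw [hs, ← PySem.Int.le_floordiv_iff_mul_le h4]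
    have hfl : lim - c < (s + 1) * d := by
      rw [hs, ← PySem.Int.floordiv_lt_iff_lt_mul h4]; omega
    refine ⟨by omega, fun i hi1 hi2 => ⟨by nlinarith, by nlinarith⟩, fun hok => ?_⟩
    obtain ⟨_, h2k⟩ := hok
    nlinarith
  · -- d < 0, s = c // (-d)
    have hs : s = PySem.Int.floordiv c (-d) := by simpa using h.symm
    push_neg at h3
    have hd : 0 < -d := by omega
    have hs1 : 1 ≤ s := by
      rw [hs, PySem.Int.le_floordiv_iff_mul_le hd]; omega
    have hub : s * (-d) ≤ c := by
      rw [hs, ← PySem.Int.le_floordiv_iff_mul_le hd]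
    have hfl : c < (s + 1) * (-d) := by
      rw [hs, ← PySem.Int.floordiv_lt_iff_lt_mul hd]; omega
    refine ⟨by omega, fun i hi1 hi2 => ⟨by nlinarith, by nlinarith⟩, fun hok => ?_⟩
    obtain ⟨h2k, _⟩ := hok
    nlinarith

lemma steps_some_le (c d lim s : Int) (h : lineSteps c d lim = some s) :
    s ≤ (c.natAbs : Int) + lim.natAbs := by
  unfold lineSteps at h
  split_ifs at h with h1 h2 h3 h4
  · obtain rfl : (0 : Int) = s := by simpa using h
    omega
  · obtain rfl : (0 : Int) = s := by simpa using h
    omega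
  · have hs : s = PySem.Int.floordiv (lim - c) d := by simpa using h.symm
    push_neg at h3
    have h' : s < (lim - c) + 1 := by
      rw [hs, PySem.Int.floordiv_lt_iff_lt_mul h4]
      nlinarith
    omega
  · have hs : s = PySem.Int.floordiv c (-d) := by simpa using h.symm
    push_neg at h3
    have hd : 0 < -d := by omega
    have h' : s < c + 1 := by
      rw [hs, PySem.Int.floordiv_lt_iff_lt_mul hd]
      nlinarith
    omega

-- A's loop produces exactly the first n points when step i+n is the first failure
lemma loop_eq (x y xd yd lx ly : Int) :
    ∀ (n fuel : Nat) (i : Int), n < fuel →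
    (∀ j : Nat, j < n → axOk x xd lx (i + (j : Int)) ∧ axOk y yd ly (i + (j : Int))) →
    ¬ (axOk x xd lx (i + (n : Int)) ∧ axOk y yd ly (i + (n : Int))) →
    lineLoop x y xd yd lx ly fuel i =
      (List.range n).map (fun j : Nat => (x + xd * (i + (j : Int)), y + yd * (i + (j : Int)))) := by
  intro n
  induction n with
  | zero =>
    intro fuel i hf _ hfail
    obtain ⟨f, rfl⟩ : ∃ f, fuel = f + 1 := ⟨fuel - 1, by omega⟩
    simp only [axOk, Int.natCast_zero, add_zero] at hfail
    by_cases hx : x + xd * i < 0 ∨ x + xd * i > lx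
    · simp [lineLoop, hx]
    · push_neg at hx
      have hy : y + yd * i < 0 ∨ y + yd * i > ly := by
        by_contra hc; push_neg at hc
        exact hfail ⟨⟨hx.1, hx.2⟩, hc.1, hc.2⟩
      have hx' : ¬ (x + xd * i < 0 ∨ x + xd * i > lx) := by omega
      simp [lineLoop, hx', hy]
  | succ n ih =>
    intro fuel i hf hok hfail
    obtain ⟨f, rfl⟩ : ∃ f, fuel = f + 1 := ⟨fuel - 1, by omega⟩
    have h0 := hok 0 (by omega)
    simp only [axOk, Int.natCast_zero, add_zero] at h0
    obtain ⟨⟨hx0, hx1⟩, hy0, hy1⟩ := h0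
    have hxg : ¬ (x + xd * i < 0 ∨ x + xd * i > lx) := by omega
    have hyg : ¬ (y + yd * i < 0 ∨ y + yd * i > ly) := by omega
    simp only [lineLoop]
    rw [if_neg hxg, if_neg hyg]
    rw [ih f (i + 1) (by omega)
      (fun j hj => by
        have h := hok (j + 1) (by omega)
        have hc : i + 1 + (j : Int) = i + (((j : Nat) + 1 : Nat) : Int) := by push_cast; ring
        rw [hc]; exact h)
      (by
        have hc : i + 1 + (n : Int) = i + (((n : Nat) + 1 : Nat) : Int) := by push_cast; ring
        rw [hc]; exact hfail)]
    rw [List.range_succ_eq_map, List.map_cons, List.map_map]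
    simp only [Int.natCast_zero, add_zero]
    congr 1
    apply List.map_congr_left
    intro j _
    simp only [Function.comp_apply, Nat.succ_eq_add_one]
    have hc : i + 1 + (j : Int) = i + (((j : Nat) + 1 : Nat) : Int) := by push_cast; ring
    rw [hc]

-- B's output rewritten as a map over List.range
lemma alt_eq_range (pos dir limits : Int × Int) (n : Int) (hn : 0 ≤ n)
    (h : (match PySem.List.min?
            ([lineSteps pos.1 dir.1 limits.1, lineSteps pos.2 dir.2 limits.2].filterMap id)
            (fun v => v) with
          | some m => m
          | none => 0) = n) :
    line_alt pos dir limits =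
      (List.range n.toNat).map (fun j : Nat => (pos.1 + dir.1 * (1 + (j : Int)), pos.2 + dir.2 * (1 + (j : Int)))) := by
  unfold line_alt
  simp only [h]
  rw [PySem.List.pyRange_one, List.map_map]
  have ht : (n + 1 - 1).toNat = n.toNat := by omega
  rw [ht]
  rfl

-- ===== VERDICT (by name: the statement is the Claim_ definition above) =====
theorem line_spec : Claim_equal_line := by
  intro pos dir limits _ hpre
  unfold Spec_line
  obtain ⟨x, y⟩ := pos
  obtain ⟨xd, yd⟩ := dir
  obtain ⟨lx, ly⟩ := limits
  simp only [Pre_line] at hpre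
  rcases hbx : lineSteps x xd lx with _ | sx <;> rcases hby : lineSteps y yd ly with _ | sy
  · -- both unbounded: excluded by Pre_
    obtain ⟨hdx, hx0, hx1⟩ := steps_none_spec _ _ _ hbx
    obtain ⟨hdy, hy0, hy1⟩ := steps_none_spec _ _ _ hby
    exact absurd ⟨hdx, hdy, hx0, hx1, hy0, hy1⟩ hpre
  · -- x unbounded, y bounded by sy
    obtain ⟨hs0, hsok, hsfail⟩ := steps_some_spec _ _ _ _ hby
    have hle := steps_some_le _ _ _ _ hby
    have hmin : (match PySem.List.min?
        ([lineSteps x xd lx, lineSteps y yd ly].filterMap id) (fun v => v) with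
        | some m => m | none => 0) = sy := by
      rw [hbx, hby]; simp [PySem.List.min?]
    rw [alt_eq_range (x, y) (xd, yd) (lx, ly) sy hs0 hmin]
    unfold line
    rw [loop_eq x y xd yd lx ly sy.toNat _ 1 (by simp only []; omega)
      (fun j hj => ⟨axOk_of_none _ _ _ hbx _, hsok (1 + j) (by omega) (by omega)⟩)
      (by
        intro hc
        have h1 : (1 : Int) + (sy.toNat : Int) = sy + 1 := by omega
        rw [h1] at hc
        exact hsfail hc.2)]
  · -- x bounded by sx, y unbounded
    obtain ⟨hs0, hsok, hsfail⟩ := steps_some_spec _ _ _ _ hbx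
    have hle := steps_some_le _ _ _ _ hbx
    have hmin : (match PySem.List.min?
        ([lineSteps x xd lx, lineSteps y yd ly].filterMap id) (fun v => v) with
        | some m => m | none => 0) = sx := by
      rw [hbx, hby]; simp [PySem.List.min?]
    rw [alt_eq_range (x, y) (xd, yd) (lx, ly) sx hs0 hmin]
    unfold line
    rw [loop_eq x y xd yd lx ly sx.toNat _ 1 (by simp only []; omega)
      (fun j hj => ⟨hsok (1 + j) (by omega) (by omega), axOk_of_none _ _ _ hby _⟩)
      (by
        intro hc
        have h1 : (1 : Int) + (sx.toNat : Int) = sx + 1 := by omega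
        rw [h1] at hc
        exact hsfail hc.1)]
  · -- both bounded: n = min sx sy
    obtain ⟨hsx0, hsxok, hsxfail⟩ := steps_some_spec _ _ _ _ hbx
    obtain ⟨hsy0, hsyok, hsyfail⟩ := steps_some_spec _ _ _ _ hby
    have hlex := steps_some_le _ _ _ _ hbx
    have hmin : (match PySem.List.min?
        ([lineSteps x xd lx, lineSteps y yd ly].filterMap id) (fun v => v) with
        | some m => m | none => 0) = min sx sy := by
      rw [hbx, hby]; simp only [List.filterMap_cons, List.filterMap_nil, id, PySem.List.min?]
      simp only [List.foldl]
      split_ifs with hlt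
      · show sy = min sx sy
        omega
      · show sx = min sx sy
        omega
    rw [alt_eq_range (x, y) (xd, yd) (lx, ly) (min sx sy) (by omega) hmin]
    unfold line
    rw [loop_eq x y xd yd lx ly (min sx sy).toNat _ 1 (by simp only []; omega)
      (fun j hj => ⟨hsxok (1 + j) (by omega) (by omega), hsyok (1 + j) (by omega) (by omega)⟩)
      (by
        intro hc
        rcases le_total sx sy with hxy | hxy
        · have h1 : (1 : Int) + ((min sx sy).toNat : Int) = sx + 1 := by omega
          rw [h1] at hc
          exact hsxfail hc.1
        · have h1 : (1 : Int) + ((min sx sy).toNat : Int) = sy + 1 := by omega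
          rw [h1] at hc
          exact hsyfail hc.2)]
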